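-- pv_equiv track=rewrite | github.com/koguchic/AdventOfCode2024 | michelle/02/solution_part1.py | is_report_valid
-- ===== SOURCE A (Python) =====
-- def is_report_valid(report):
--     # quick check that the difference between the first and last number are not too far
--     max_distance = 3 * (len(report) - 1)
--     if abs(report[0] - report[-1]) > max_distance:
--         return 0
--
--     # must be increasing or decreasing
--     # this is o(nlogn) - an optimization could occur here
--     # but the code is beautiful ngl
--     increasing = sorted(report)
--     decreasing = sorted(report, reverse=True)
--     if report != increasing and report != decreasing:
--         return 0
--
--     ## two adjacent levels differ by at least one and at most three
--     for i in range(len(report) - 1):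
--         distance = abs(report[i] - report[i+1])
--         if distance == 0 or distance > 3:
--             return 0
--
--     return 1
-- ===== SOURCE B (Python) =====
-- def is_report_valid(report):
--     # single linear pass: fix the direction from the first pair, then check every step is 1..3 in that direction
--     n = len(report)
--     if n < 2:
--         return 1
--     direction = 1 if report[1] > report[0] else -1
--     for i in range(n - 1):
--         d = (report[i + 1] - report[i]) * direction
--         if d < 1 or d > 3:
--             return 0
--     return 1
-- ===== Notes on version B (the rewrite author's own statement) =====
-- stated objective: faster
-- what changed: A sorts the list twice (sorted and reverse-sorted copies) plus an extra distance pre-check; B makes one linear pass that fixes the direction from the first pair and checks every adjacent step is between 1 and 3 in that direction.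
import Mathlib
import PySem

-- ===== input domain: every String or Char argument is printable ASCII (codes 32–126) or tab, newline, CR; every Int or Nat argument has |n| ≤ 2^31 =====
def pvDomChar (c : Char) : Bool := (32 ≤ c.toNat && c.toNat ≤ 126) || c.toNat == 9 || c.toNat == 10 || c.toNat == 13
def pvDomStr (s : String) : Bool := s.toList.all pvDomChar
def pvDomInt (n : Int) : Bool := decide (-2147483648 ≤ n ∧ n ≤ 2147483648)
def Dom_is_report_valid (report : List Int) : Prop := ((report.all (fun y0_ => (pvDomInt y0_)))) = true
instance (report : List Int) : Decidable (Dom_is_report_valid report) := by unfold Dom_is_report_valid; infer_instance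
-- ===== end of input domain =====

-- B replaces A's two sorts by a single pass that fixes the direction from the first pair and
-- checks every adjacent step is 1..3 in that direction; objective: faster.

-- ===== PORT A =====
def is_report_valid (report : List Int) : Int :=
  let max_distance : Int := 3 * (PySem.List.len report - 1)
  match PySem.List.pyGet? report 0, PySem.List.pyGet? report (-1) with
  | some first, some last =>
    if |first - last| > max_distance then 0
    else
      let increasing := PySem.List.sorted report (fun x => x) false
      let decreasing := PySem.List.sorted report (fun x => x) true
      if report ≠ increasing ∧ report ≠ decreasing then 0
      else
        if (PySem.List.pyRange 0 (PySem.List.len report - 1) 1).any (fun i =>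
            let distance := |PySem.List.pyGetD report i 0 - PySem.List.pyGetD report (i+1) 0|
            distance == 0 || distance > 3) then 0
        else 1
  | _, _ => 0   -- report[0] raises IndexError on the empty list; excluded by Pre_

-- ===== PORT B =====
def is_report_valid_alt (report : List Int) : Int :=
  let n : Int := PySem.List.len report
  if n < 2 then 1
  else
    let direction : Int :=
      if PySem.List.pyGetD report 1 0 > PySem.List.pyGetD report 0 0 then 1 else -1
    if (PySem.List.pyRange 0 (n - 1) 1).any (fun i =>
        let d := (PySem.List.pyGetD report (i + 1) 0 - PySem.List.pyGetD report i 0) * direction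
        decide (d < 1) || decide (3 < d)) then 0
    else 1

-- ===== PRECONDITION & SPEC =====
-- Pre_ excludes only the empty list, on which A raises IndexError (report[0]).
def Pre_is_report_valid (report : List Int) : Prop := report ≠ []
instance (report : List Int) : Decidable (Pre_is_report_valid report) := by
  unfold Pre_is_report_valid; infer_instance
def pvWitness_is_report_valid : List Int := [1, 3, 4]

def Spec_is_report_valid (report : List Int) (out : Int) : Prop := out = is_report_valid_alt report
instance (report : List Int) (out : Int) : Decidable (Spec_is_report_valid report out) := by
  unfold Spec_is_report_valid; infer_instance

-- ===== CLAIM (what is proved, stated in full; the proofs are below) =====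
def Claim_equal_is_report_valid : Prop := ∀ (report : List Int), Dom_is_report_valid report → Pre_is_report_valid report → Spec_is_report_valid report (is_report_valid report)

-- ===== LEMMAS AND PROOFS =====

-- every adjacent step goes up by 1..3
def UpAll (r : List Int) : Prop :=
  ∀ k : Nat, k + 1 < r.length → 1 ≤ r.getD (k+1) 0 - r.getD k 0 ∧ r.getD (k+1) 0 - r.getD k 0 ≤ 3

-- every adjacent step goes down by 1..3
def DownAll (r : List Int) : Prop :=
  ∀ k : Nat, k + 1 < r.length → 1 ≤ r.getD k 0 - r.getD (k+1) 0 ∧ r.getD k 0 - r.getD (k+1) 0 ≤ 3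

theorem up_step (r : List Int) (h : UpAll r) :
    ∀ (d i : Nat), i + d < r.length →
      r.getD i 0 ≤ r.getD (i+d) 0 ∧ r.getD (i+d) 0 - r.getD i 0 ≤ 3 * d := by
  intro d
  induction d with
  | zero => intro i _; simp
  | succ m ih =>
    intro i hi
    have h1 := ih i (by omega)
    have h2 := h (i + m) (by omega)
    have : i + (m + 1) = (i + m) + 1 := by omega
    rw [this]
    push_cast
    push_cast at h1
    omega

theorem down_step (r : List Int) (h : DownAll r) :
    ∀ (d i : Nat), i + d < r.length →
      r.getD (i+d) 0 ≤ r.getD i 0 ∧ r.getD i 0 - r.getD (i+d) 0 ≤ 3 * d := by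
  intro d
  induction d with
  | zero => intro i _; simp
  | succ m ih =>
    intro i hi
    have h1 := ih i (by omega)
    have h2 := h (i + m) (by omega)
    have : i + (m + 1) = (i + m) + 1 := by omega
    rw [this]
    push_cast
    push_cast at h1
    omega

theorem up_pairwise (r : List Int) (h : UpAll r) : r.Pairwise (fun a b => a ≤ b) := by
  rw [List.pairwise_iff_getElem]
  intro i j hi hj hij
  have := (up_step r h (j - i) i (by omega)).1
  have hji : i + (j - i) = j := by omega
  rw [hji, List.getD_eq_getElem r 0 hi, List.getD_eq_getElem r 0 hj] at this
  exact this

theorem down_pairwise (r : List Int) (h : DownAll r) : r.Pairwise (fun a b => b ≤ a) := by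
  rw [List.pairwise_iff_getElem]
  intro i j hi hj hij
  have := (down_step r h (j - i) i (by omega)).1
  have hji : i + (j - i) = j := by omega
  rw [hji, List.getD_eq_getElem r 0 hi, List.getD_eq_getElem r 0 hj] at this
  exact this

theorem pairwise_adj_le (r : List Int) (h : r.Pairwise (fun a b => a ≤ b)) (k : Nat)
    (hk : k + 1 < r.length) : r.getD k 0 ≤ r.getD (k+1) 0 := by
  rw [List.pairwise_iff_getElem] at h
  rw [List.getD_eq_getElem r 0 hk, List.getD_eq_getElem r 0 (show k < r.length by omega)]
  exact h k (k+1) (by omega) hk (by omega)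

theorem pairwise_adj_ge (r : List Int) (h : r.Pairwise (fun a b => b ≤ a)) (k : Nat)
    (hk : k + 1 < r.length) : r.getD (k+1) 0 ≤ r.getD k 0 := by
  rw [List.pairwise_iff_getElem] at h
  rw [List.getD_eq_getElem r 0 hk, List.getD_eq_getElem r 0 (show k < r.length by omega)]
  exact h k (k+1) (by omega) hk (by omega)

theorem B_vals (r : List Int) :
    is_report_valid_alt r = 1 ∨ is_report_valid_alt r = 0 := by
  simp only [is_report_valid_alt]
  split_ifs <;> simp

theorem A_vals (r : List Int) (hpre : r ≠ []) :
    is_report_valid r = 1 ∨ is_report_valid r = 0 := by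
  have hn1 : 1 ≤ r.length := List.length_pos_of_ne_nil hpre
  have h0 : PySem.List.pyGet? r 0 = some (r.getD 0 0) := by
    rw [PySem.List.pyGet?_zero, List.getElem?_eq_getElem (by omega),
      List.getD_eq_getElem r 0 (by omega)]
  have hL : PySem.List.pyGet? r (-1) = some (r.getD (r.length - 1) 0) := by
    rw [PySem.List.pyGet?_neg_one, List.getLast?_eq_getElem?,
      List.getElem?_eq_getElem (by omega), List.getD_eq_getElem r 0 (by omega)]
  simp only [is_report_valid, h0, hL]
  split_ifs <;> simp

theorem B_one_iff (r : List Int) (hn : 2 ≤ r.length) :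
    is_report_valid_alt r = 1 ↔ (UpAll r ∨ DownAll r) := by
  have hlen : PySem.List.len r = (r.length : Int) := PySem.List.len_eq r
  have hcast : (r.length : Int) - 1 = ((r.length - 1 : Nat) : Int) := by omega
  have hgetD : ∀ k : Nat, PySem.List.pyGetD r (k : Int) 0 = r.getD k 0 :=
    fun k => PySem.List.pyGetD_natCast r k 0
  have eg : ∀ k : Nat, r[k]?.getD 0 = r.getD k 0 := fun k => rfl
  have eh : ∀ k : Nat, PySem.List.pyGetD r ((k : Int) + 1) 0 = r.getD (k+1) 0 := by
    intro k
    have e : ((k : Int) + 1) = ((k + 1 : Nat) : Int) := by push_cast; ring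
    rw [e]; exact hgetD (k+1)
  have hg1 : PySem.List.pyGetD r (1 : Int) 0 = r.getD 1 0 := by exact_mod_cast hgetD 1
  have hg0 : PySem.List.pyGetD r (0 : Int) 0 = r.getD 0 0 := by exact_mod_cast hgetD 0
  simp only [is_report_valid_alt, hlen, hg1, hg0]
  rw [if_neg (by omega : ¬ ((r.length : Int) < 2)), hcast]
  by_cases hdir : r.getD 0 0 < r.getD 1 0
  · rw [if_pos hdir]
    split_ifs with hany
    · rw [PySem.List.pyRange_one] at hany
      simp at hany
      obtain ⟨k, hk, hbad⟩ := hany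
      rw [eg k, eh k] at hbad
      constructor
      · intro h; exact absurd h (by decide)
      · rintro (hup | hdn) <;> exfalso
        · have := hup k (by omega); omega
        · have h0' := hdn 0 (by omega)
          simp only [Nat.zero_add] at h0'
          omega
    · rw [PySem.List.pyRange_one] at hany
      simp at hany
      constructor
      · intro _
        left
        intro k hkk
        have h2 := hany k (by omega)
        rw [eg k, eh k] at h2
        omega
      · intro _; rfl
  · rw [if_neg hdir]
    split_ifs with hany
    · rw [PySem.List.pyRange_one] at hany
      simp at hany
      obtain ⟨k, hk, hbad⟩ := hany
      rw [eg k, eh k] at hbad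
      constructor
      · intro h; exact absurd h (by decide)
      · rintro (hup | hdn) <;> exfalso
        · have h0' := hup 0 (by omega)
          simp only [Nat.zero_add] at h0'
          omega
        · have := hdn k (by omega); omega
    · rw [PySem.List.pyRange_one] at hany
      simp at hany
      constructor
      · intro _
        right
        intro k hkk
        have h2 := hany k (by omega)
        rw [eg k, eh k] at h2
        omega
      · intro _; rfl

theorem A_one_iff (r : List Int) (hn : 2 ≤ r.length) :
    is_report_valid r = 1 ↔ (UpAll r ∨ DownAll r) := by
  have hlen : PySem.List.len r = (r.length : Int) := PySem.List.len_eq r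
  have hcast : (r.length : Int) - 1 = ((r.length - 1 : Nat) : Int) := by omega
  have hgetD : ∀ k : Nat, PySem.List.pyGetD r (k : Int) 0 = r.getD k 0 :=
    fun k => PySem.List.pyGetD_natCast r k 0
  have eg : ∀ k : Nat, r[k]?.getD 0 = r.getD k 0 := fun k => rfl
  have eh : ∀ k : Nat, PySem.List.pyGetD r ((k : Int) + 1) 0 = r.getD (k+1) 0 := by
    intro k
    have e : ((k : Int) + 1) = ((k + 1 : Nat) : Int) := by push_cast; ring
    rw [e]; exact hgetD (k+1)
  have h0 : PySem.List.pyGet? r 0 = some (r.getD 0 0) := by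
    rw [PySem.List.pyGet?_zero, List.getElem?_eq_getElem (by omega),
      List.getD_eq_getElem r 0 (by omega)]
  have hL : PySem.List.pyGet? r (-1) = some (r.getD (r.length - 1) 0) := by
    rw [PySem.List.pyGet?_neg_one, List.getLast?_eq_getElem?,
      List.getElem?_eq_getElem (by omega), List.getD_eq_getElem r 0 (by omega)]
  simp only [is_report_valid, h0, hL, hlen]
  rw [hcast]
  split_ifs with hc1 hc2 hany
  · constructor
    · intro h; exact absurd h (by decide)
    · rintro (hup | hdn) <;> exfalso
      · have hs := up_step r hup (r.length - 1) 0 (by omega)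
        have e : 0 + (r.length - 1) = r.length - 1 := by omega
        rw [e] at hs
        rw [abs_sub_comm, abs_of_nonneg (by omega)] at hc1
        omega
      · have hs := down_step r hdn (r.length - 1) 0 (by omega)
        have e : 0 + (r.length - 1) = r.length - 1 := by omega
        rw [e] at hs
        rw [abs_of_nonneg (by omega)] at hc1
        omega
  · constructor
    · intro h; exact absurd h (by decide)
    · rintro (hup | hdn) <;> exfalso
      · exact hc2.1 (PySem.List.sorted_eq_self_of_pairwise r (fun x => x) (up_pairwise r hup)).symm
      · exact hc2.2 (PySem.List.sorted_rev_eq_self_of_pairwise r (fun x => x) (down_pairwise r hdn)).symm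
  · rw [PySem.List.pyRange_one] at hany
    simp at hany
    obtain ⟨k, hk, hbad⟩ := hany
    rw [eg k, eh k] at hbad
    constructor
    · intro h; exact absurd h (by decide)
    · rintro (hup | hdn) <;> exfalso
      · have := hup k (by omega)
        rcases hbad with hbad | hbad
        · omega
        · rw [abs_sub_comm, abs_of_nonneg (by omega)] at hbad
          omega
      · have := hdn k (by omega)
        rcases hbad with hbad | hbad
        · omega
        · rw [abs_of_nonneg (by omega)] at hbad
          omega
  · rw [PySem.List.pyRange_one] at hany
    simp at hany
    rw [not_and_or, not_not, not_not] at hc2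
    constructor
    · intro _
      rcases hc2 with hc2 | hc2
      · left
        intro k hkk
        have hpw : r.Pairwise (fun a b => a ≤ b) := by
          have hsp := PySem.List.sorted_pairwise (xs := r) (key := fun x => x)
          rw [← hc2] at hsp
          exact hsp
        have hadj := pairwise_adj_le r hpw k hkk
        have h2 := hany k (by omega)
        rw [eg k, eh k] at h2
        rw [abs_sub_comm, abs_of_nonneg (by omega)] at h2
        omega
      · right
        intro k hkk
        have hpw : r.Pairwise (fun a b => b ≤ a) := by
          have hsp := PySem.List.sorted_pairwise_rev (xs := r) (key := fun x => x)
          rw [← hc2] at hsp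
          exact hsp
        have hadj := pairwise_adj_ge r hpw k hkk
        have h2 := hany k (by omega)
        rw [eg k, eh k] at h2
        rw [abs_of_nonneg (by omega)] at h2
        omega
    · intro _; rfl

theorem main_equiv (r : List Int) (hpre : r ≠ []) :
    is_report_valid r = is_report_valid_alt r := by
  have hn1 : 1 ≤ r.length := List.length_pos_of_ne_nil hpre
  by_cases hn : r.length < 2
  · obtain ⟨a, rfl⟩ : ∃ a, r = [a] := List.length_eq_one_iff.mp (by omega)
    have e1 : PySem.List.sorted [a] (fun x => x) false = [a] :=
      PySem.List.sorted_eq_self_of_pairwise [a] (fun x => x) (List.pairwise_singleton _ _)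
    have e2 : PySem.List.sorted [a] (fun x => x) true = [a] :=
      PySem.List.sorted_rev_eq_self_of_pairwise [a] (fun x => x) (List.pairwise_singleton _ _)
    simp [is_report_valid, is_report_valid_alt, e1, e2,
      PySem.List.pyGet?_neg_one, PySem.List.pyRange_one_eq_nil]
  · push_neg at hn
    rcases A_vals r hpre with ha | ha <;> rcases B_vals r with hb | hb
    · rw [ha, hb]
    · have h1 : is_report_valid_alt r = 1 := (B_one_iff r hn).mpr ((A_one_iff r hn).mp ha)
      rw [hb] at h1
      exact absurd h1 (by decide)
    · have h1 : is_report_valid r = 1 := (A_one_iff r hn).mpr ((B_one_iff r hn).mp hb)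
      rw [ha] at h1
      exact absurd h1 (by decide)
    · rw [ha, hb]

-- ===== VERDICT (by name: the statement is the Claim_ definition above) =====
theorem is_report_valid_spec : Claim_equal_is_report_valid := by
  intro r _ hpre
  unfold Spec_is_report_valid
  exact main_equiv r hpre
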